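-- pv_equiv track=rewrite | github.com/awicek/L.I.T.S | others/generate_files.py | rate6
-- ===== SOURCE A (Python) =====
-- import copy
--
-- def rate6 (field):
--     result = list()
--     coords =list()
--     if field[2] == 3 or field[3] == 3:
--         mode = 1
--         matrix = [[0,0],[0,0],[0,0]]
--         for i in range(3):
--             for j in range(2):
--                 coords.append([i,j])
--                 matrix[i][j] = field[i*2+j]
--         matrix2 = copy.deepcopy(matrix)
--         while coords:
--             x,y = coords.pop(0)
--             stack = [[x,y]]
--             c = 0
--             while stack:
--                 x,y = stack.pop()
--                 if 0 <= x <3 and 0<= y < 2: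
--                     if matrix[x][y] == 1:
--                         c += 1
--                         for xx,yy in [[0,1],[1,0],[0,-1],[-1,0]]:
--                             stack.append([x + xx, y + yy])
--                     matrix[x][y] = 3
--             if c >= 1:
--                 result.append(c)
--     else:
--         mode =2
--         matrix = [[0,0,0],[0,0,0]]
--         for i in range(2):
--             for j in range(3):
--                 coords.append([i,j])
--                 matrix[i][j] = field[i*3+j]
--         matrix2 = copy.deepcopy(matrix)
--         while coords:
--             x,y = coords.pop(0)
--             stack = [[x,y]]
--             c = 0
--             while stack:
--                 x,y = stack.pop()
--                 if 0 <= x <2 and 0<= y < 3: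
--                     if matrix[x][y] == 1:
--                         c += 1
--                         for xx,yy in [[0,1],[1,0],[0,-1],[-1,0]]:
--                             stack.append([x + xx, y + yy])
--                     matrix[x][y] = 3
--             if c >= 1:
--                 result.append(c)
--     if result:
--         if max(result) > 3 or len(result) ==3:
--             return 1
--         if len (result) == 2:
--             return 1
--         if len(result) ==1:
--             if result[0] == 2:
--                 if mode == 1:
--                     if matrix2[0][0] == 1 and matrix2[0][1] == 1:
--                         if matrix2[1][0] == 2 or matrix2[1][1] == 2:
--                             return 2
--                     elif matrix2[2][0] == 1 and matrix2[2][1] == 1: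
--                         if matrix2[1][0] == 2 or matrix2[1][1] == 2:
--                             return 2
--
--                 if mode == 2:
--                     if matrix2[0][0] == 1 and matrix2[1][0] == 1:
--                         if matrix2[0][1] == 2 or matrix2[1][1] == 2:
--                             return 2
--                     elif matrix2[0][2] == 1 and matrix2[1][2] == 1:
--                         if matrix2[0][1] == 2 or matrix2[1][1] == 2:
--                             return 2
--     return 0
-- ===== SOURCE B (Python) =====
-- def rate6(field):
--     # Union-find over 1-cells instead of BFS flood fill; same classification.
--     if field[2] == 3 or field[3] == 3:
--         mode, R, C = 1, 3, 2
--     else: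
--         mode, R, C = 2, 2, 3
--     grid = [field[k] for k in range(6)]
--     parent = list(range(6))
--
--     def find(k):
--         while parent[k] != k:
--             k = parent[k]
--         return k
--
--     for i in range(R):
--         for j in range(C):
--             k = i * C + j
--             if grid[k] != 1:
--                 continue
--             if j + 1 < C and grid[k + 1] == 1:
--                 ra, rb = find(k), find(k + 1)
--                 if ra != rb:
--                     parent[ra] = rb
--             if i + 1 < R and grid[k + C] == 1:
--                 ra, rb = find(k), find(k + C)
--                 if ra != rb:
--                     parent[ra] = rb
--
--     sizes = {}
--     for k in range(6):
--         if grid[k] == 1: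
--             r = find(k)
--             sizes[r] = sizes.get(r, 0) + 1
--     result = list(sizes.values())
--
--     if not result:
--         return 0
--     if len(result) >= 2 or max(result) > 3:
--         return 1
--     if result[0] == 2:
--         g = lambda i, j: grid[i * C + j]
--         if mode == 1:
--             if g(0, 0) == 1 and g(0, 1) == 1 and (g(1, 0) == 2 or g(1, 1) == 2):
--                 return 2
--             if g(2, 0) == 1 and g(2, 1) == 1 and (g(1, 0) == 2 or g(1, 1) == 2):
--                 return 2
--         else:
--             if g(0, 0) == 1 and g(1, 0) == 1 and (g(0, 1) == 2 or g(1, 1) == 2):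
--                 return 2
--             if g(0, 2) == 1 and g(1, 2) == 1 and (g(0, 1) == 2 or g(1, 1) == 2):
--                 return 2
--     return 0
-- ===== Notes on version B (the rewrite author's own statement) =====
-- stated objective: alternative
-- what changed: The queue-plus-stack flood fill that collects connected-component sizes is replaced by a union-find (disjoint-set) pass over the adjacent cell pairs, with component sizes read off from a single counting dict; the mode selection and the classification tail keep the same decision logic.
import Mathlib
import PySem

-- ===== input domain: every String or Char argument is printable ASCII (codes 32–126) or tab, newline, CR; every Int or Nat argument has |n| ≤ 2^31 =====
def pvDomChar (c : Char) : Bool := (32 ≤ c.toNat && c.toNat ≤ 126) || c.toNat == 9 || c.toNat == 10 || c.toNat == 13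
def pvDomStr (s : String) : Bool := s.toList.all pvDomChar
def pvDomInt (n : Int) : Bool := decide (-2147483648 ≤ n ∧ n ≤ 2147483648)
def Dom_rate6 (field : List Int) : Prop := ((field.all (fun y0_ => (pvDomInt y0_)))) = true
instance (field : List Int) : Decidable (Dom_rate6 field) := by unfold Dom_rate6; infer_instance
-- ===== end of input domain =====

-- B replaces A's queue+stack flood fill by a union-find over the 1-cells (simpler single scan of
-- the adjacent cell pairs); the classification tail is the same decision logic.

-- ===== PORT A =====
-- field[i] (in range at every use under Pre_)
def fgetF (field : List Int) (i : Int) : Int := (PySem.List.pyGet? field i).getD 0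

-- matrix[x][y]; exact under A's bounds guard 0<=x<rows, 0<=y<cols (matrix rows are full)
def mgetA (m : List (List Int)) (x y : Int) : Int :=
  (PySem.List.pyGet? ((PySem.List.pyGet? m x).getD []) y).getD 0

def msetA (m : List (List Int)) (x y : Int) (v : Int) : List (List Int) :=
  m.set x.toNat (((PySem.List.pyGet? m x).getD []).set y.toNat v)

-- the inner `while stack` loop; stack head = Python's stack top (append/pop at the same end),
-- neighbours consed in Python's append order so they pop in the same order.  The fuel 40 is a
-- totality guard only: the loop pops one entry per step and pushes 4 entries at most once per
-- matrix cell (the cell is overwritten with 3), so at most 1 + 4*6 = 25 steps ever happen.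
def bfsA (Rn Cn : Int) : Nat → List (Int × Int) → List (List Int) → Int → Int × List (List Int)
  | 0, _, m, c => (c, m)
  | _ + 1, [], m, c => (c, m)
  | fuel + 1, (x, y) :: st, m, c =>
    if 0 ≤ x ∧ x < Rn ∧ 0 ≤ y ∧ y < Cn then
      if mgetA m x y = 1 then
        bfsA Rn Cn fuel ((x-1, y) :: (x, y-1) :: (x+1, y) :: (x, y+1) :: st)
          (msetA m x y 3) (c + 1)
      else bfsA Rn Cn fuel st (msetA m x y 3) c
    else bfsA Rn Cn fuel st m c

-- the `while coords` loop: coords is popped front-to-back, i.e. a fold over the coord list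
def sweepA (Rn Cn : Int) (coords : List (Int × Int)) (m : List (List Int)) : List Int :=
  (coords.foldl (fun acc xy =>
      let r := bfsA Rn Cn 40 [xy] acc.2 0
      (if 1 ≤ r.1 then acc.1 ++ [r.1] else acc.1, r.2)) (([] : List Int), m)).1

-- the classification tail (m2 is the unmutated deepcopy matrix2)
def classifyA (mode : Int) (m2 : List (List Int)) (result : List Int) : Int :=
  if result ≠ [] then
    if 3 < (PySem.List.max? result (fun y => y)).getD 0 ∨ result.length = 3 then 1
    else if result.length = 2 then 1
    else if result.length = 1 then
      if (PySem.List.pyGet? result 0).getD 0 = 2 then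
        if mode = 1 then
          if mgetA m2 0 0 = 1 ∧ mgetA m2 0 1 = 1 then
            (if mgetA m2 1 0 = 2 ∨ mgetA m2 1 1 = 2 then 2 else 0)
          else if mgetA m2 2 0 = 1 ∧ mgetA m2 2 1 = 1 then
            (if mgetA m2 1 0 = 2 ∨ mgetA m2 1 1 = 2 then 2 else 0)
          else 0
        else if mode = 2 then
          if mgetA m2 0 0 = 1 ∧ mgetA m2 1 0 = 1 then
            (if mgetA m2 0 1 = 2 ∨ mgetA m2 1 1 = 2 then 2 else 0)
          else if mgetA m2 0 2 = 1 ∧ mgetA m2 1 2 = 1 then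
            (if mgetA m2 0 1 = 2 ∨ mgetA m2 1 1 = 2 then 2 else 0)
          else 0
        else 0
      else 0
    else 0
  else 0

def rate6 (field : List Int) : Int :=
  if fgetF field 2 = 3 ∨ fgetF field 3 = 3 then
    let coords := (List.range 3).flatMap (fun i => (List.range 2).map (fun j => ((i : Int), (j : Int))))
    let matrix := (List.range 3).map (fun i => (List.range 2).map (fun j => fgetF field ((i : Int) * 2 + (j : Int))))
    classifyA 1 matrix (sweepA 3 2 coords matrix)
  else
    let coords := (List.range 2).flatMap (fun i => (List.range 3).map (fun j => ((i : Int), (j : Int))))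
    let matrix := (List.range 2).map (fun i => (List.range 3).map (fun j => fgetF field ((i : Int) * 3 + (j : Int))))
    classifyA 2 matrix (sweepA 2 3 coords matrix)

-- ===== PORT B =====
-- `while parent[k] != k: k = parent[k]`; parent chains over 6 cells have length < 8, so the
-- fuel 8 is a totality guard only
def ufFind : Nat → List Int → Int → Int
  | 0, _, k => k
  | fuel + 1, p, k => if fgetF p k = k then k else ufFind fuel p (fgetF p k)

def ufUnion (p : List Int) (a b : Int) : List Int :=
  let ra := ufFind 8 p a
  let rb := ufFind 8 p b
  if ra ≠ rb then p.set ra.toNat rb else p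

def rate6_alt (field : List Int) : Int :=
  let mode : Int := if fgetF field 2 = 3 ∨ fgetF field 3 = 3 then 1 else 2
  let Rn : Int := if mode = 1 then 3 else 2
  let Cn : Int := if mode = 1 then 2 else 3
  let grid : List Int := (List.range 6).map (fun k => fgetF field (k : Int))
  let parent : List Int :=
    (PySem.List.pyRange 0 Rn 1).foldl (fun p i =>
      (PySem.List.pyRange 0 Cn 1).foldl (fun p j =>
        let k := i * Cn + j
        if fgetF grid k ≠ 1 then p
        else
          let p1 := if j + 1 < Cn ∧ fgetF grid (k + 1) = 1 then ufUnion p k (k + 1) else p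
          if i + 1 < Rn ∧ fgetF grid (k + Cn) = 1 then ufUnion p1 k (k + Cn) else p1) p)
      ((List.range 6).map (fun k => ((k : Nat) : Int)))
  let sizes : PySem.Dict Int Int :=
    (List.range 6).foldl (fun d k =>
      if fgetF grid (k : Int) = 1 then
        let r := ufFind 8 parent (k : Int)
        d.insert r (d.getD r 0 + 1)
      else d) (PySem.Dict.empty)
  let result := sizes.values
  if result = [] then 0
  else if 2 ≤ result.length ∨ 3 < (PySem.List.max? result (fun y => y)).getD 0 then 1
  else if (PySem.List.pyGet? result 0).getD 0 = 2 then
    let g : Int → Int → Int := fun i j => fgetF grid (i * Cn + j)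
    if mode = 1 then
      if g 0 0 = 1 ∧ g 0 1 = 1 ∧ (g 1 0 = 2 ∨ g 1 1 = 2) then 2
      else if g 2 0 = 1 ∧ g 2 1 = 1 ∧ (g 1 0 = 2 ∨ g 1 1 = 2) then 2
      else 0
    else
      if g 0 0 = 1 ∧ g 1 0 = 1 ∧ (g 0 1 = 2 ∨ g 1 1 = 2) then 2
      else if g 0 2 = 1 ∧ g 1 2 = 1 ∧ (g 0 1 = 2 ∨ g 1 1 = 2) then 2
      else 0
  else 0

-- ===== PRECONDITION & SPEC =====
-- Python A raises IndexError on any list with fewer than 6 elements (it reads field[0..5])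
def Pre_rate6 (field : List Int) : Prop := 6 ≤ field.length
instance (field : List Int) : Decidable (Pre_rate6 field) := by unfold Pre_rate6; infer_instance
def pvWitness_rate6 : List Int := [1, 1, 3, 0, 0, 0]

def Spec_rate6 (field : List Int) (out : Int) : Prop := out = rate6_alt field
instance (field : List Int) (out : Int) : Decidable (Spec_rate6 field out) := by unfold Spec_rate6; infer_instance

-- ===== CLAIM (what is proved, stated in full; the proofs are below) =====
def Claim_equal_rate6 : Prop := ∀ (field : List Int), Dom_rate6 field → Pre_rate6 field → Spec_rate6 field (rate6 field)

-- ===== LEMMAS AND PROOFS =====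

-- Both programs read cell k only through the tests `= 1` (all k), `= 2` (k ∈ {1,2,3,4}) and
-- `= 3` (k ∈ {2,3}), so each cell can be canonicalised into a small alphabet without changing
-- either result; the 2*3*4*4*3*2 = 576 canonical boards are then checked exhaustively.
def c01 (a : Int) : Int := if a = 1 then 1 else 0
def c012 (a : Int) : Int := if a = 1 then 1 else if a = 2 then 2 else 0
def canon (a : Int) : Int := if a = 1 then 1 else if a = 2 then 2 else if a = 3 then 3 else 0

def canonF (field : List Int) : List Int :=
  [c01 (fgetF field 0), c012 (fgetF field 1), canon (fgetF field 2),
   canon (fgetF field 3), c012 (fgetF field 4), c01 (fgetF field 5)]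

theorem c01_eq_one (a : Int) : (c01 a = 1) = (a = 1) := by
  unfold c01; split_ifs <;> simp_all
theorem c012_eq_one (a : Int) : (c012 a = 1) = (a = 1) := by
  unfold c012; split_ifs <;> simp_all
theorem c012_eq_two (a : Int) : (c012 a = 2) = (a = 2) := by
  unfold c012; split_ifs <;> simp_all
theorem canon_eq_one (a : Int) : (canon a = 1) = (a = 1) := by
  unfold canon; split_ifs <;> simp_all
theorem canon_eq_two (a : Int) : (canon a = 2) = (a = 2) := by
  unfold canon; split_ifs <;> simp_all
theorem canon_eq_three (a : Int) : (canon a = 3) = (a = 3) := by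
  unfold canon; split_ifs <;> simp_all

-- "same cell pattern" relation used to carry A's flood fill across canonicalisation
def Rel1 (a b : Int) : Prop := (a = 1) ↔ (b = 1)
def MRel (m m' : List (List Int)) : Prop := List.Forall₂ (List.Forall₂ Rel1) m m'

theorem c01_rel (a : Int) : Rel1 (c01 a) a := by unfold Rel1; rw [c01_eq_one]
theorem c012_rel (a : Int) : Rel1 (c012 a) a := by unfold Rel1; rw [c012_eq_one]
theorem canon_rel (a : Int) : Rel1 (canon a) a := by unfold Rel1; rw [canon_eq_one]

theorem f2_get? {α : Type} {r : α → α → Prop} {l l' : List α} (h : List.Forall₂ r l l') (n : Nat) :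
    (l[n]? = none ∧ l'[n]? = none) ∨ ∃ a b, l[n]? = some a ∧ l'[n]? = some b ∧ r a b := by
  induction h generalizing n with
  | nil => left; simp
  | cons hr _ ih =>
    cases n with
    | zero => right; exact ⟨_, _, rfl, rfl, hr⟩
    | succ n => simp only [List.getElem?_cons_succ]; exact ih n

theorem f2_set {α : Type} {r : α → α → Prop} {l l' : List α} (h : List.Forall₂ r l l')
    (n : Nat) {a b : α} (hab : r a b) : List.Forall₂ r (l.set n a) (l'.set n b) := by
  induction h generalizing n with
  | nil => simp only [List.set_nil]; exact List.Forall₂.nil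
  | @cons x y tl tl' hr hrest ih =>
    cases n with
    | zero => simpa using List.Forall₂.cons hab hrest
    | succ n => simpa using List.Forall₂.cons hr (ih n)

theorem mget_rel {m m' : List (List Int)} (h : MRel m m') (x y : Int)
    (hx : 0 ≤ x) (hy : 0 ≤ y) : Rel1 (mgetA m x y) (mgetA m' x y) := by
  unfold mgetA
  rw [PySem.List.pyGet?_of_nonneg m hx, PySem.List.pyGet?_of_nonneg m' hx]
  rcases f2_get? h x.toNat with ⟨h1, h2⟩ | ⟨r1, r2, h1, h2, hr⟩
  · simp [h1, h2, PySem.List.pyGet?_of_nonneg _ hy, Rel1]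
  · rw [h1, h2]
    simp only [Option.getD_some]
    rw [PySem.List.pyGet?_of_nonneg r1 hy, PySem.List.pyGet?_of_nonneg r2 hy]
    rcases f2_get? hr y.toNat with ⟨g1, g2⟩ | ⟨a, b, g1, g2, hab⟩
    · simp [g1, g2, Rel1]
    · simpa [g1, g2] using hab

theorem mset_rel {m m' : List (List Int)} (h : MRel m m') (x y : Int)
    (hx : 0 ≤ x) (_hy : 0 ≤ y) : MRel (msetA m x y 3) (msetA m' x y 3) := by
  unfold msetA
  rw [PySem.List.pyGet?_of_nonneg m hx, PySem.List.pyGet?_of_nonneg m' hx]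
  rcases f2_get? h x.toNat with ⟨h1, h2⟩ | ⟨r1, r2, h1, h2, hr⟩
  · simp only [h1, h2, Option.getD_none]
    exact f2_set h _ List.Forall₂.nil
  · simp only [h1, h2, Option.getD_some]
    exact f2_set h _ (f2_set hr _ (Iff.rfl))

theorem bfs_rel (Rn Cn : Int) : ∀ (fuel : Nat) (st : List (Int × Int)) (m m' : List (List Int))
    (c : Int), MRel m m' →
    (bfsA Rn Cn fuel st m c).1 = (bfsA Rn Cn fuel st m' c).1 ∧
      MRel (bfsA Rn Cn fuel st m c).2 (bfsA Rn Cn fuel st m' c).2 := by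
  intro fuel
  induction fuel with
  | zero => intro st m m' c h; exact ⟨rfl, h⟩
  | succ n ih =>
    intro st m m' c h
    cases st with
    | nil => exact ⟨rfl, h⟩
    | cons xy st =>
      obtain ⟨x, y⟩ := xy
      by_cases hb : 0 ≤ x ∧ x < Rn ∧ 0 ≤ y ∧ y < Cn
      · have hm := mget_rel h x y hb.1 hb.2.2.1
        by_cases h1 : mgetA m x y = 1
        · have h1' : mgetA m' x y = 1 := hm.mp h1
          simp only [bfsA, if_pos hb, if_pos h1, if_pos h1']
          exact ih _ _ _ _ (mset_rel h x y hb.1 hb.2.2.1)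
        · have h1' : ¬ mgetA m' x y = 1 := fun hh => h1 (hm.mpr hh)
          simp only [bfsA, if_pos hb, if_neg h1, if_neg h1']
          exact ih _ _ _ _ (mset_rel h x y hb.1 hb.2.2.1)
      · simp only [bfsA, if_neg hb]
        exact ih _ _ _ _ h

theorem sweep_fold_rel (Rn Cn : Int) : ∀ (coords : List (Int × Int)) (res : List Int)
    (m m' : List (List Int)), MRel m m' →
    (coords.foldl (fun acc xy =>
        let r := bfsA Rn Cn 40 [xy] acc.2 0
        (if 1 ≤ r.1 then acc.1 ++ [r.1] else acc.1, r.2)) (res, m)).1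
    = (coords.foldl (fun acc xy =>
        let r := bfsA Rn Cn 40 [xy] acc.2 0
        (if 1 ≤ r.1 then acc.1 ++ [r.1] else acc.1, r.2)) (res, m')).1 := by
  intro coords
  induction coords with
  | nil => intro res m m' _; rfl
  | cons xy tl ih =>
    intro res m m' h
    obtain ⟨hc, hm⟩ := bfs_rel Rn Cn 40 [xy] m m' 0 h
    simp only [List.foldl_cons]
    rw [hc]
    exact ih _ _ _ hm

theorem sweep_rel {m m' : List (List Int)} (Rn Cn : Int) (coords : List (Int × Int))
    (h : MRel m m') : sweepA Rn Cn coords m = sweepA Rn Cn coords m' :=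
  sweep_fold_rel Rn Cn coords [] m m' h

-- literal-index evaluations of the cell accessors (used to discharge the canonical rewrites)
theorem mgetA32_00 (a b c d e g : Int) : mgetA [[a,b],[c,d],[e,g]] 0 0 = a := rfl
theorem mgetA32_01 (a b c d e g : Int) : mgetA [[a,b],[c,d],[e,g]] 0 1 = b := rfl
theorem mgetA32_10 (a b c d e g : Int) : mgetA [[a,b],[c,d],[e,g]] 1 0 = c := rfl
theorem mgetA32_11 (a b c d e g : Int) : mgetA [[a,b],[c,d],[e,g]] 1 1 = d := rfl
theorem mgetA32_20 (a b c d e g : Int) : mgetA [[a,b],[c,d],[e,g]] 2 0 = e := rfl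
theorem mgetA32_21 (a b c d e g : Int) : mgetA [[a,b],[c,d],[e,g]] 2 1 = g := rfl
theorem mgetA23_00 (a b c d e g : Int) : mgetA [[a,b,c],[d,e,g]] 0 0 = a := rfl
theorem mgetA23_01 (a b c d e g : Int) : mgetA [[a,b,c],[d,e,g]] 0 1 = b := rfl
theorem mgetA23_02 (a b c d e g : Int) : mgetA [[a,b,c],[d,e,g]] 0 2 = c := rfl
theorem mgetA23_10 (a b c d e g : Int) : mgetA [[a,b,c],[d,e,g]] 1 0 = d := rfl
theorem mgetA23_11 (a b c d e g : Int) : mgetA [[a,b,c],[d,e,g]] 1 1 = e := rfl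
theorem mgetA23_12 (a b c d e g : Int) : mgetA [[a,b,c],[d,e,g]] 1 2 = g := rfl
theorem fgetF_0 (a b c d e g : Int) : fgetF [a,b,c,d,e,g] 0 = a := rfl
theorem fgetF_1 (a b c d e g : Int) : fgetF [a,b,c,d,e,g] 1 = b := rfl
theorem fgetF_2 (a b c d e g : Int) : fgetF [a,b,c,d,e,g] 2 = c := rfl
theorem fgetF_3 (a b c d e g : Int) : fgetF [a,b,c,d,e,g] 3 = d := rfl
theorem fgetF_4 (a b c d e g : Int) : fgetF [a,b,c,d,e,g] 4 = e := rfl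
theorem fgetF_5 (a b c d e g : Int) : fgetF [a,b,c,d,e,g] 5 = g := rfl

theorem rate6_canon (field : List Int) : rate6 (canonF field) = rate6 field := by
  simp only [rate6]
  rw [show fgetF (canonF field) 2 = canon (fgetF field 2) from rfl,
      show fgetF (canonF field) 3 = canon (fgetF field 3) from rfl]
  simp only [canon_eq_three]
  by_cases hm : fgetF field 2 = 3 ∨ fgetF field 3 = 3
  · simp only [if_pos hm]
    rw [show ((List.range 3).map (fun i => (List.range 2).map (fun j => fgetF (canonF field) ((i:Int)*2 + (j:Int)))))
        = [[c01 (fgetF field 0), c012 (fgetF field 1)],[canon (fgetF field 2), canon (fgetF field 3)],[c012 (fgetF field 4), c01 (fgetF field 5)]] from rfl,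
        show ((List.range 3).map (fun i => (List.range 2).map (fun j => fgetF field ((i:Int)*2 + (j:Int)))))
        = [[fgetF field 0, fgetF field 1],[fgetF field 2, fgetF field 3],[fgetF field 4, fgetF field 5]] from rfl]
    have hrel : MRel
        [[c01 (fgetF field 0), c012 (fgetF field 1)],[canon (fgetF field 2), canon (fgetF field 3)],[c012 (fgetF field 4), c01 (fgetF field 5)]]
        [[fgetF field 0, fgetF field 1],[fgetF field 2, fgetF field 3],[fgetF field 4, fgetF field 5]] := by
      refine List.Forall₂.cons (List.Forall₂.cons (c01_rel _) (List.Forall₂.cons (c012_rel _) List.Forall₂.nil)) ?_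
      refine List.Forall₂.cons (List.Forall₂.cons (canon_rel _) (List.Forall₂.cons (canon_rel _) List.Forall₂.nil)) ?_
      exact List.Forall₂.cons (List.Forall₂.cons (c012_rel _) (List.Forall₂.cons (c01_rel _) List.Forall₂.nil)) List.Forall₂.nil
    rw [sweep_rel 3 2 _ hrel]
    simp only [classifyA, mgetA32_00, mgetA32_01, mgetA32_10, mgetA32_11, mgetA32_20, mgetA32_21,
      c01_eq_one, c012_eq_one, c012_eq_two, canon_eq_one, canon_eq_two]
    rfl
  · simp only [if_neg hm]
    rw [show ((List.range 2).map (fun i => (List.range 3).map (fun j => fgetF (canonF field) ((i:Int)*3 + (j:Int)))))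
        = [[c01 (fgetF field 0), c012 (fgetF field 1), canon (fgetF field 2)],[canon (fgetF field 3), c012 (fgetF field 4), c01 (fgetF field 5)]] from rfl,
        show ((List.range 2).map (fun i => (List.range 3).map (fun j => fgetF field ((i:Int)*3 + (j:Int)))))
        = [[fgetF field 0, fgetF field 1, fgetF field 2],[fgetF field 3, fgetF field 4, fgetF field 5]] from rfl]
    have hrel : MRel
        [[c01 (fgetF field 0), c012 (fgetF field 1), canon (fgetF field 2)],[canon (fgetF field 3), c012 (fgetF field 4), c01 (fgetF field 5)]]
        [[fgetF field 0, fgetF field 1, fgetF field 2],[fgetF field 3, fgetF field 4, fgetF field 5]] := by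
      refine List.Forall₂.cons (List.Forall₂.cons (c01_rel _) (List.Forall₂.cons (c012_rel _) (List.Forall₂.cons (canon_rel _) List.Forall₂.nil))) ?_
      exact List.Forall₂.cons (List.Forall₂.cons (canon_rel _) (List.Forall₂.cons (c012_rel _) (List.Forall₂.cons (c01_rel _) List.Forall₂.nil))) List.Forall₂.nil
    rw [sweep_rel 2 3 _ hrel]
    simp only [classifyA, mgetA23_00, mgetA23_01, mgetA23_02, mgetA23_10, mgetA23_11, mgetA23_12,
      c01_eq_one, c012_eq_one, c012_eq_two, canon_eq_one, canon_eq_two]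
    rfl

-- proof-side restatement of rate6_alt's tail, factored so that the two grid canonicalisation
-- rewrites can be done fold-by-fold instead of on one inlined term
def parentB (Rn Cn : Int) (grid : List Int) : List Int :=
  (PySem.List.pyRange 0 Rn 1).foldl (fun p i =>
    (PySem.List.pyRange 0 Cn 1).foldl (fun p j =>
      let k := i * Cn + j
      if fgetF grid k ≠ 1 then p
      else
        let p1 := if j + 1 < Cn ∧ fgetF grid (k + 1) = 1 then ufUnion p k (k + 1) else p
        if i + 1 < Rn ∧ fgetF grid (k + Cn) = 1 then ufUnion p1 k (k + Cn) else p1) p)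
    ((List.range 6).map (fun k => ((k : Nat) : Int)))

def sizesB (grid parent : List Int) : PySem.Dict Int Int :=
  (List.range 6).foldl (fun d k =>
    if fgetF grid (k : Int) = 1 then
      let r := ufFind 8 parent (k : Int)
      d.insert r (d.getD r 0 + 1)
    else d) (PySem.Dict.empty)

def altBody (mode Rn Cn : Int) (grid : List Int) : Int :=
  let parent := parentB Rn Cn grid
  let sizes := sizesB grid parent
  let result := sizes.values
  if result = [] then 0
  else if 2 ≤ result.length ∨ 3 < (PySem.List.max? result (fun y => y)).getD 0 then 1
  else if (PySem.List.pyGet? result 0).getD 0 = 2 then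
    let g : Int → Int → Int := fun i j => fgetF grid (i * Cn + j)
    if mode = 1 then
      if g 0 0 = 1 ∧ g 0 1 = 1 ∧ (g 1 0 = 2 ∨ g 1 1 = 2) then 2
      else if g 2 0 = 1 ∧ g 2 1 = 1 ∧ (g 1 0 = 2 ∨ g 1 1 = 2) then 2
      else 0
    else
      if g 0 0 = 1 ∧ g 1 0 = 1 ∧ (g 0 1 = 2 ∨ g 1 1 = 2) then 2
      else if g 0 2 = 1 ∧ g 1 2 = 1 ∧ (g 0 1 = 2 ∨ g 1 1 = 2) then 2
      else 0
  else 0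

theorem alt_eq_body (field : List Int) : rate6_alt field =
    if fgetF field 2 = 3 ∨ fgetF field 3 = 3 then
      altBody 1 3 2 ((List.range 6).map (fun k => fgetF field (k : Int)))
    else
      altBody 2 2 3 ((List.range 6).map (fun k => fgetF field (k : Int))) := by
  by_cases hc : fgetF field 2 = 3 ∨ fgetF field 3 = 3
  · simp only [rate6_alt, altBody, parentB, sizesB, if_pos hc, Int.reduceEq, reduceIte]
  · simp only [rate6_alt, altBody, parentB, sizesB, if_neg hc, Int.reduceEq, reduceIte]

theorem fgetF_m1 (a b c d e g : Int) : fgetF [a,b,c,d,e,g] (-1) = g := rfl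
theorem fgetF_m2 (a b c d e g : Int) : fgetF [a,b,c,d,e,g] (-2) = e := rfl
theorem fgetF_m3 (a b c d e g : Int) : fgetF [a,b,c,d,e,g] (-3) = d := rfl
theorem fgetF_m4 (a b c d e g : Int) : fgetF [a,b,c,d,e,g] (-4) = c := rfl
theorem fgetF_m5 (a b c d e g : Int) : fgetF [a,b,c,d,e,g] (-5) = b := rfl
theorem fgetF_m6 (a b c d e g : Int) : fgetF [a,b,c,d,e,g] (-6) = a := rfl

-- every cell test `= 1` is invariant under the per-cell canonicalisation
theorem grid_one_inv (a0 a1 a2 a3 a4 a5 : Int) (k : Int) :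
    (fgetF [c01 a0, c012 a1, canon a2, canon a3, c012 a4, c01 a5] k = 1)
      = (fgetF [a0, a1, a2, a3, a4, a5] k = 1) := by
  by_cases hr : -6 ≤ k ∧ k < 6
  · obtain ⟨h1, h2⟩ := hr
    interval_cases k <;>
      simp only [fgetF_0, fgetF_1, fgetF_2, fgetF_3, fgetF_4, fgetF_5,
        fgetF_m1, fgetF_m2, fgetF_m3, fgetF_m4, fgetF_m5, fgetF_m6,
        c01_eq_one, c012_eq_one, canon_eq_one]
  · have hn : ¬ PySem.Raise.InRange 6 k := by
      simp only [PySem.Raise.InRange]; omega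
    have e1 : PySem.List.pyGet? [c01 a0, c012 a1, canon a2, canon a3, c012 a4, c01 a5] k
        = none := (PySem.List.pyGet?_eq_none_iff _ _).mpr (by simpa using hn)
    have e2 : PySem.List.pyGet? [a0, a1, a2, a3, a4, a5] k = none :=
      (PySem.List.pyGet?_eq_none_iff _ _).mpr (by simpa using hn)
    simp [fgetF, e1, e2]

theorem parentB1_congr (a0 a1 a2 a3 a4 a5 : Int) :
    parentB 3 2 [c01 a0, c012 a1, canon a2, canon a3, c012 a4, c01 a5]
      = parentB 3 2 [a0, a1, a2, a3, a4, a5] := by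
  unfold parentB
  rw [show PySem.List.pyRange 0 3 1 = [0,1,2] from by decide,
      show PySem.List.pyRange 0 2 1 = [0,1] from by decide]
  refine PySem.List.foldl_congr_mem _ _ _ _ ?_
  intro p i hi
  fin_cases hi <;>
  · refine PySem.List.foldl_congr_mem _ _ _ _ ?_
    intro q j hj
    fin_cases hj <;>
      simp only [Int.reduceMul, Int.reduceAdd, Int.reduceLT, ne_eq, grid_one_inv]

theorem parentB2_congr (a0 a1 a2 a3 a4 a5 : Int) :
    parentB 2 3 [c01 a0, c012 a1, canon a2, canon a3, c012 a4, c01 a5]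
      = parentB 2 3 [a0, a1, a2, a3, a4, a5] := by
  unfold parentB
  rw [show PySem.List.pyRange 0 2 1 = [0,1] from by decide,
      show PySem.List.pyRange 0 3 1 = [0,1,2] from by decide]
  refine PySem.List.foldl_congr_mem _ _ _ _ ?_
  intro p i hi
  fin_cases hi <;>
  · refine PySem.List.foldl_congr_mem _ _ _ _ ?_
    intro q j hj
    fin_cases hj <;>
      simp only [Int.reduceMul, Int.reduceAdd, Int.reduceLT, ne_eq, grid_one_inv]

theorem sizesB_congr (a0 a1 a2 a3 a4 a5 : Int) (P : List Int) :
    sizesB [c01 a0, c012 a1, canon a2, canon a3, c012 a4, c01 a5] P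
      = sizesB [a0, a1, a2, a3, a4, a5] P := by
  unfold sizesB
  refine PySem.List.foldl_congr_mem _ _ _ _ ?_
  intro d k hk
  fin_cases hk <;>
    simp only [Nat.cast_ofNat, Nat.cast_zero, Nat.cast_one, grid_one_inv]

theorem altBody1_congr (a0 a1 a2 a3 a4 a5 : Int) :
    altBody 1 3 2 [c01 a0, c012 a1, canon a2, canon a3, c012 a4, c01 a5]
      = altBody 1 3 2 [a0, a1, a2, a3, a4, a5] := by
  simp only [altBody]
  rw [parentB1_congr, sizesB_congr]
  simp only [Int.reduceMul, Int.reduceAdd, reduceIte,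
    fgetF_0, fgetF_1, fgetF_2, fgetF_3, fgetF_4, fgetF_5,
    c01_eq_one, c012_eq_one, c012_eq_two, canon_eq_one, canon_eq_two]
  rfl

theorem altBody2_congr (a0 a1 a2 a3 a4 a5 : Int) :
    altBody 2 2 3 [c01 a0, c012 a1, canon a2, canon a3, c012 a4, c01 a5]
      = altBody 2 2 3 [a0, a1, a2, a3, a4, a5] := by
  simp only [altBody]
  rw [parentB2_congr, sizesB_congr]
  simp only [Int.reduceMul, Int.reduceAdd,
    fgetF_0, fgetF_1, fgetF_2, fgetF_3, fgetF_4, fgetF_5,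
    c01_eq_one, c012_eq_one, c012_eq_two, canon_eq_one, canon_eq_two]
  rfl

theorem rate6_alt_canon (field : List Int) : rate6_alt (canonF field) = rate6_alt field := by
  rw [alt_eq_body (canonF field), alt_eq_body field]
  rw [show fgetF (canonF field) 2 = canon (fgetF field 2) from rfl,
      show fgetF (canonF field) 3 = canon (fgetF field 3) from rfl]
  simp only [canon_eq_three]
  rw [show ((List.range 6).map (fun k => fgetF (canonF field) (k : Int)))
      = [c01 (fgetF field 0), c012 (fgetF field 1), canon (fgetF field 2), canon (fgetF field 3),
         c012 (fgetF field 4), c01 (fgetF field 5)] from rfl,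
      show ((List.range 6).map (fun k => fgetF field (k : Int)))
      = [fgetF field 0, fgetF field 1, fgetF field 2, fgetF field 3, fgetF field 4,
         fgetF field 5] from rfl]
  by_cases hm : fgetF field 2 = 3 ∨ fgetF field 3 = 3
  · simp only [if_pos hm]
    exact altBody1_congr _ _ _ _ _ _
  · simp only [if_neg hm]
    exact altBody2_congr _ _ _ _ _ _

set_option maxRecDepth 10000 in
set_option maxHeartbeats 1000000 in
theorem key_codes : ∀ a ∈ [(0:Int),1], ∀ b ∈ [(0:Int),1,2], ∀ c ∈ [(0:Int),1,2,3],
    ∀ d ∈ [(0:Int),1,2,3], ∀ e ∈ [(0:Int),1,2], ∀ g ∈ [(0:Int),1],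
    rate6 [a, b, c, d, e, g] = rate6_alt [a, b, c, d, e, g] := by
  decide

theorem c01_mem (a : Int) : c01 a ∈ [(0:Int),1] := by
  unfold c01; split_ifs <;> simp
theorem c012_mem (a : Int) : c012 a ∈ [(0:Int),1,2] := by
  unfold c012; split_ifs <;> simp
theorem canon_mem (a : Int) : canon a ∈ [(0:Int),1,2,3] := by
  unfold canon; split_ifs <;> simp

-- ===== VERDICT (by name: the statement is the Claim_ definition above) =====
theorem rate6_spec : Claim_equal_rate6 := by
  intro field _ _
  unfold Spec_rate6
  rw [← rate6_canon field, ← rate6_alt_canon field]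
  exact key_codes _ (c01_mem _) _ (c012_mem _) _ (canon_mem _) _ (canon_mem _) _ (c012_mem _)
    _ (c01_mem _)
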